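-- pv_equiv track=rewrite | github.com/N3pomuceno/si_progI_exercicios | 2449.py | limite
-- ===== SOURCE A (Python) =====
-- def limite(temp, num):
--     qtd = 0
--     for ind in range(len(temp)-1):
--         if temp[ind]!= num:
--             numero1 = num - temp[ind]
--             if numero1 > 0:
--                 temp[ind] += numero1
--                 temp[ind+1] += numero1
--             elif numero1 < 0:
--                 temp[ind] += numero1
--                 temp[ind+1] += numero1
--             qtd += abs(numero1)
--     return qtd
-- ===== SOURCE B (Python) =====
-- def limite(temp, num):
--     # Carry accumulator instead of mutating the list; return value only (A mutates temp in place, B does not).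
--     qtd = 0
--     carry = 0
--     for x in temp[:len(temp) - 1]:
--         carry = num - x - carry
--         qtd += abs(carry)
--     return qtd
-- ===== Notes on version B (the rewrite author's own statement) =====
-- stated objective: simpler
-- what changed: Replaces A's in-place array propagation (mutating temp[ind] and temp[ind+1]) and its two identical sign branches with a single branchless pass keeping a scalar carry (carry = num - x - carry) and summing its absolute values; return-value equivalence only, since A mutates temp and B does not.
import Mathlib
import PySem

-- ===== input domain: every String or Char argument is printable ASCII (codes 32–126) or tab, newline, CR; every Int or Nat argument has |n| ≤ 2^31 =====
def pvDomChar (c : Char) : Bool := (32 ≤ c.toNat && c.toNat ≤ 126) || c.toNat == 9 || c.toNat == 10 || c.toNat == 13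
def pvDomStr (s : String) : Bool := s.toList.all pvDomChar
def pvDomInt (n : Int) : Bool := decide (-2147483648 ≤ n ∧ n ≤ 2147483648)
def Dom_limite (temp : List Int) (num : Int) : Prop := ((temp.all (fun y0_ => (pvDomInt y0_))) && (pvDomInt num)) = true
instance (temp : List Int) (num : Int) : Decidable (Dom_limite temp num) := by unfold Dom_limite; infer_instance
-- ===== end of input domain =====

-- B keeps the running difference in a scalar carry instead of mutating the list; equivalence is about the RETURN value only (A mutates temp in place, B does not).

-- ===== PORT A =====
-- temp[i] += d  (index always in range in A's loop; getD transcribes the in-range read)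
def pvUpdAt (t : List Int) (i : Nat) (d : Int) : List Int := t.set i (t.getD i 0 + d)

def limiteStep (num : Int) (s : List Int × Int) (ind : Nat) : List Int × Int :=
  if s.1.getD ind 0 ≠ num then
    let numero1 := num - s.1.getD ind 0
    let t1 := if numero1 > 0 then pvUpdAt (pvUpdAt s.1 ind numero1) (ind+1) numero1
              else if numero1 < 0 then pvUpdAt (pvUpdAt s.1 ind numero1) (ind+1) numero1
              else s.1
    (t1, s.2 + |numero1|)
  else s

def limite (temp : List Int) (num : Int) : Int :=
  ((List.range (temp.length - 1)).foldl (limiteStep num) (temp, (0:Int))).2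

-- ===== PORT B =====
def limite_alt (temp : List Int) (num : Int) : Int :=
  ((temp.take (temp.length - 1)).foldl
    (fun (s : Int × Int) x => let c := num - x - s.1; (c, s.2 + |c|)) ((0:Int), (0:Int))).2

-- ===== PRECONDITION & SPEC =====
def Spec_limite (temp : List Int) (num : Int) (out : Int) : Prop := out = limite_alt temp num
instance (temp : List Int) (num : Int) (out : Int) : Decidable (Spec_limite temp num out) := by unfold Spec_limite; infer_instance

-- ===== CLAIM (what is proved, stated in full; the proofs are below) =====
def Claim_equal_limite : Prop := ∀ (temp : List Int) (num : Int), Dom_limite temp num → Spec_limite temp num (limite temp num)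

-- ===== LEMMAS AND PROOFS =====

-- the carry after k iterations, and the accumulated count
def pvC (temp : List Int) (num : Int) : Nat → Int
  | 0 => 0
  | k+1 => num - temp.getD k 0 - pvC temp num k

def pvQ (temp : List Int) (num : Int) : Nat → Int
  | 0 => 0
  | k+1 => pvQ temp num k + |pvC temp num (k+1)|

lemma alt_inv (temp : List Int) (num : Int) :
    ∀ m, m ≤ temp.length →
      (temp.take m).foldl
        (fun (s : Int × Int) x => let c := num - x - s.1; (c, s.2 + |c|)) ((0:Int), (0:Int))
      = (pvC temp num m, pvQ temp num m) := by
  intro m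
  induction m with
  | zero => intro _; simp [pvC, pvQ]
  | succ k ih =>
    intro h
    have hk : k < temp.length := Nat.lt_of_succ_le h
    have : temp.take (k+1) = temp.take k ++ [temp.getD k 0] := by
      rw [List.take_succ]
      simp [List.getElem?_eq_getElem hk, List.getD, List.getElem?_eq_getElem hk]
    rw [this, List.foldl_append, ih (Nat.le_of_lt hk)]
    simp [pvC, pvQ]

-- mid-list access/update helpers
lemma pv_getD_mid (p : List Int) (x : Int) (r : List Int) (k : Nat) (hp : p.length = k) :
    (p ++ x :: r).getD k 0 = x := by
  subst hp
  induction p with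
  | nil => rfl
  | cons a q ih => simpa using ih

lemma pv_set_mid (p : List Int) (x v : Int) (r : List Int) (k : Nat) (hp : p.length = k) :
    (p ++ x :: r).set k v = p ++ v :: r := by
  subst hp
  induction p with
  | nil => rfl
  | cons a q ih => simpa using ih

-- A's loop invariant: after m iterations the first m slots are num, slot m holds temp[m]+carry, qtd = pvQ m
lemma a_inv (temp : List Int) (num : Int) :
    ∀ m, m < temp.length →
      (List.range m).foldl (limiteStep num) (temp, (0:Int))
      = (List.replicate m num ++ (temp.getD m 0 + pvC temp num m) :: temp.drop (m+1),
         pvQ temp num m) := by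
  intro m
  induction m with
  | zero =>
    intro h
    cases temp with
    | nil => simp at h
    | cons a l => simp [pvC, pvQ, List.getD]
  | succ k ih =>
    intro h
    have hk : k < temp.length := Nat.lt_of_succ_lt h
    rw [List.range_succ, List.foldl_append, ih hk]
    simp only [List.foldl_cons, List.foldl_nil]
    set t := List.replicate k num ++ (temp.getD k 0 + pvC temp num k) :: temp.drop (k+1) with ht
    have hlenrep : (List.replicate k num : List Int).length = k := by simp
    have hget : t.getD k 0 = temp.getD k 0 + pvC temp num k :=
      pv_getD_mid _ _ _ _ hlenrep
    have hdrop : temp.drop (k+1) = temp.getD (k+1) 0 :: temp.drop (k+2) := by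
      rw [List.getD_eq_getElem temp 0 h]
      exact List.drop_eq_getElem_cons h
    have hn1 : num - t.getD k 0 = pvC temp num (k+1) := by
      rw [hget]; show _ = num - temp.getD k 0 - pvC temp num k; ring
    by_cases hne : t.getD k 0 = num
    · -- carry becomes zero: step does nothing
      have hc0 : pvC temp num (k+1) = 0 := by rw [← hn1, hne]; ring
      rw [show limiteStep num (t, pvQ temp num k) k = (t, pvQ temp num k) from by
        simp only [limiteStep]; rw [if_neg (not_not_intro hne)]]
      have hnum : temp.getD k 0 + pvC temp num k = num := by rw [← hget, hne]
      rw [ht, hdrop, hnum, hc0]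
      simp [pvQ, hc0, List.replicate_succ' (n := k)]
    · -- carry nonzero: both sign branches perform the same update
      have hne' : (num - t.getD k 0) ≠ 0 := fun h0 => hne (by linarith [sub_eq_zero.mp h0])
      have hstep : limiteStep num (t, pvQ temp num k) k
          = (pvUpdAt (pvUpdAt t k (num - t.getD k 0)) (k+1) (num - t.getD k 0),
             pvQ temp num k + |num - t.getD k 0|) := by
        simp only [limiteStep]
        rw [if_pos hne]
        rcases lt_trichotomy (num - t.getD k 0) 0 with hlt | heq | hgt
        · rw [if_neg (by omega), if_pos hlt]
        · exact absurd heq hne'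
        · rw [if_pos hgt]
      rw [hstep]
      have h1 : pvUpdAt t k (num - t.getD k 0) = List.replicate k num ++ num :: temp.drop (k+1) := by
        unfold pvUpdAt
        rw [ht]
        rw [pv_set_mid _ _ _ _ _ hlenrep]
        congr 1
        rw [← ht, hget]; ring
      have hlen2 : (List.replicate k num ++ [num] : List Int).length = k + 1 := by simp
      have h2 : pvUpdAt (List.replicate k num ++ num :: temp.drop (k+1)) (k+1) (num - t.getD k 0)
          = List.replicate (k+1) num ++ (temp.getD (k+1) 0 + pvC temp num (k+1)) :: temp.drop (k+2) := by
        unfold pvUpdAt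
        rw [hdrop]
        have hsplit : List.replicate k num ++ num :: temp.getD (k+1) 0 :: temp.drop (k+2)
            = (List.replicate k num ++ [num]) ++ temp.getD (k+1) 0 :: temp.drop (k+2) := by simp
        rw [hsplit, pv_getD_mid _ _ _ _ hlen2, pv_set_mid _ _ _ _ _ hlen2]
        rw [List.replicate_succ' (n := k)]
        rw [hn1]
      rw [h1, h2, hn1]
      simp [pvQ]

-- ===== VERDICT (by name: the statement is the Claim_ definition above) =====
theorem limite_spec : Claim_equal_limite := by
  intro temp num _
  unfold Spec_limite
  cases temp with
  | nil => rfl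
  | cons a l =>
    have hlt : (a :: l : List Int).length - 1 < (a :: l).length := by simp
    have hle : (a :: l : List Int).length - 1 ≤ (a :: l).length := Nat.le_of_lt hlt
    unfold limite limite_alt
    rw [a_inv (a :: l) num _ hlt, alt_inv (a :: l) num _ hle]
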